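-- pv_equiv track=rewrite | github.com/rajeshpp/ML-AI | DS/Online_NPTEL/Week3/asn2_valley.py | valley
-- ===== SOURCE A (Python) =====
-- def valley(list):
--   if(len(list)==0):
--     return(True)
--   if(len(list)==1):
--     return(False)
--   if(list[0]<list[1]):
--     return(False)
--   for i in range(0,len(list)-1):
--     if(list[i]<list[i+1]):
--       pos=i
--       break
--     if(list[i]==list[i+1]):
--       return(False)
--   else:
--     return(False)
--   for i in range(pos,len(list)-1):
--     if(list[i]>=list[i+1]):
--       return(False)
--   return(True)
-- ===== SOURCE B (Python) =====
-- def valley(list):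
--     n = len(list)
--     if n == 0:
--         return True
--     if n < 3:
--         return False
--     # argmin: first index of the minimum element
--     b = 0
--     for i in range(1, n):
--         if list[i] < list[b]:
--             b = i
--     if b == 0 or b == n - 1:
--         return False
--     return all(list[i] > list[i + 1] for i in range(b)) and \
--            all(list[i] < list[i + 1] for i in range(b, n - 1))
-- ===== Notes on version B (the rewrite author's own statement) =====
-- stated objective: alternative
-- what changed: A scans inline for the first 'turn' index and then checks the tail; B first computes the valley bottom as the argmin (first index of the minimum), rejects a non-interior bottom, and then verifies the two flanks (strictly decreasing prefix, strictly increasing suffix) independently.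
import Mathlib
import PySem

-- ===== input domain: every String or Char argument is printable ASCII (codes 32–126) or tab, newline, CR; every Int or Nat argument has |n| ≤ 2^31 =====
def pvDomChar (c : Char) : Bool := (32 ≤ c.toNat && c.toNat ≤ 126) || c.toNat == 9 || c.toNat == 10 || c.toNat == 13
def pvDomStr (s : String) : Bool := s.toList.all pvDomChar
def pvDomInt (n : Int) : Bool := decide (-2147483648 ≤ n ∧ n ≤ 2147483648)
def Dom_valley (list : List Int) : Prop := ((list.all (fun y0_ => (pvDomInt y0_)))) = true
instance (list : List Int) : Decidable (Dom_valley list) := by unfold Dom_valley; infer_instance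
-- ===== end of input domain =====

-- B differs from A by decomposition: A scans inline for the first "turn" and then checks the
-- tail; B computes the argmin first and then verifies the two flanks. Same value everywhere.
-- (The `fuel` parameters below are only a totality device; the loops always get enough fuel.)

-- ===== PORT A =====
-- second loop of A: for i in range(pos, len-1): if list[i]>=list[i+1]: return False; return True
def valleyLoop2 (l : List Int) (fuel : Nat) (i : Nat) : Bool :=
  match fuel with
  | 0 => true
  | fuel + 1 =>
    if i < l.length - 1 then
      if l.getD i 0 ≥ l.getD (i + 1) 0 then false
      else valleyLoop2 l fuel (i + 1)
    else true

-- first loop of A with its for/else: break with pos=i on '<' (then run the second loop),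
-- return False on '==', fall through to the for-else (return False) when the loop exhausts
def valleyLoop1 (l : List Int) (fuel : Nat) (i : Nat) : Bool :=
  match fuel with
  | 0 => false
  | fuel + 1 =>
    if i < l.length - 1 then
      if l.getD i 0 < l.getD (i + 1) 0 then valleyLoop2 l (l.length - 1 - i) i
      else if l.getD i 0 = l.getD (i + 1) 0 then false
      else valleyLoop1 l fuel (i + 1)
    else false

def valley (list : List Int) : Bool :=
  if list.length = 0 then true
  else if list.length = 1 then false
  else if list.getD 0 0 < list.getD 1 0 then false
  else valleyLoop1 list list.length 0

-- ===== PORT B =====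
-- b = 0; for i in range(1, n): if list[i] < list[b]: b = i
def argminLoop (l : List Int) (fuel : Nat) (b : Nat) (i : Nat) : Nat :=
  match fuel with
  | 0 => b
  | fuel + 1 =>
    if i < l.length then
      if l.getD i 0 < l.getD b 0 then argminLoop l fuel i (i + 1)
      else argminLoop l fuel b (i + 1)
    else b

def valley_alt (list : List Int) : Bool :=
  if list.length = 0 then true
  else if list.length < 3 then false
  else if argminLoop list list.length 0 1 = 0 ∨ argminLoop list list.length 0 1 = list.length - 1 then false
  else
    ((List.range (argminLoop list list.length 0 1)).all fun i =>
        decide (list.getD i 0 > list.getD (i + 1) 0)) &&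
    ((List.range' (argminLoop list list.length 0 1) (list.length - 1 - argminLoop list list.length 0 1)).all fun i =>
        decide (list.getD i 0 < list.getD (i + 1) 0))

-- ===== PRECONDITION & SPEC =====
def Spec_valley (list : List Int) (out : Bool) : Prop := out = valley_alt list
instance (list : List Int) (out : Bool) : Decidable (Spec_valley list out) := by unfold Spec_valley; infer_instance

-- ===== CLAIM (what is proved, stated in full; the proofs are below) =====
def Claim_equal_valley : Prop := ∀ (list : List Int), Dom_valley list → Spec_valley list (valley list)

-- ===== LEMMAS AND PROOFS =====

-- the common characterisation: an interior bottom p, strictly decreasing before it,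
-- strictly increasing from it on
def ValleyAt (l : List Int) (p : Nat) : Prop :=
  1 ≤ p ∧ p + 1 < l.length ∧
  (∀ j, j < p → l.getD (j + 1) 0 < l.getD j 0) ∧
  (∀ j, p ≤ j → j + 1 < l.length → l.getD j 0 < l.getD (j + 1) 0)

theorem valleyLoop2_iff (l : List Int) :
    ∀ (fuel i : Nat), l.length - 1 - i ≤ fuel →
    (valleyLoop2 l fuel i = true ↔
      ∀ j, i ≤ j → j + 1 < l.length → l.getD j 0 < l.getD (j + 1) 0) := by
  intro fuel
  induction fuel with
  | zero =>
    intro i hf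
    constructor
    · intro _ j hij hj; omega
    · intro _; rfl
  | succ fuel ih =>
    intro i hf
    simp only [valleyLoop2]
    by_cases h : i < l.length - 1
    · rw [if_pos h]
      by_cases hge : l.getD i 0 ≥ l.getD (i + 1) 0
      · rw [if_pos hge]
        constructor
        · intro hfalse; exact absurd hfalse (by simp)
        · intro hall; have := hall i le_rfl (by omega); omega
      · rw [if_neg hge]
        rw [ih (i + 1) (by omega)]
        constructor
        · intro hall j hij hj
          rcases Nat.eq_or_lt_of_le hij with heq | hlt
          · subst heq; omega
          · exact hall j hlt hj
        · intro hall j hij hj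
          exact hall j (by omega) hj
    · rw [if_neg h]
      constructor
      · intro _ j hij hj; omega
      · intro _; rfl

theorem valleyLoop1_iff (l : List Int) :
    ∀ (fuel i : Nat), l.length - 1 - i ≤ fuel →
    (valleyLoop1 l fuel i = true ↔
      ∃ p, i ≤ p ∧ p + 1 < l.length ∧
        (∀ j, i ≤ j → j < p → l.getD (j + 1) 0 < l.getD j 0) ∧
        (∀ j, p ≤ j → j + 1 < l.length → l.getD j 0 < l.getD (j + 1) 0)) := by
  intro fuel
  induction fuel with
  | zero =>
    intro i hf
    constructor
    · intro hfalse; simp [valleyLoop1] at hfalse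
    · rintro ⟨p, hip, hp1, -, -⟩
      exact absurd hp1 (by omega)
  | succ fuel ih =>
    intro i hf
    simp only [valleyLoop1]
    by_cases h : i < l.length - 1
    · rw [if_pos h]
      by_cases hlt : l.getD i 0 < l.getD (i + 1) 0
      · rw [if_pos hlt]
        rw [valleyLoop2_iff l (l.length - 1 - i) i le_rfl]
        constructor
        · intro hall
          exact ⟨i, le_rfl, by omega, by intro j h1 h2; omega, hall⟩
        · rintro ⟨p, hip, hp1, hdec, hinc⟩
          rcases Nat.eq_or_lt_of_le hip with heq | hplt
          · intro j hij hj
            exact hinc j (by omega) hj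
          · have := hdec i le_rfl hplt
            omega
      · rw [if_neg hlt]
        by_cases heq : l.getD i 0 = l.getD (i + 1) 0
        · rw [if_pos heq]
          constructor
          · intro hfalse; exact absurd hfalse (by simp)
          · rintro ⟨p, hip, hp1, hdec, hinc⟩
            rcases Nat.eq_or_lt_of_le hip with heq' | hplt
            · have := hinc i (by omega) (by omega); omega
            · have := hdec i le_rfl hplt; omega
        · rw [if_neg heq]
          rw [ih (i + 1) (by omega)]
          constructor
          · rintro ⟨p, hip, hp1, hdec, hinc⟩
            refine ⟨p, by omega, hp1, ?_, hinc⟩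
            intro j h1 h2
            by_cases hji : j = i
            · subst hji; omega
            · exact hdec j (by omega) h2
          · rintro ⟨p, hip, hp1, hdec, hinc⟩
            have hpi : i + 1 ≤ p := by
              rcases Nat.eq_or_lt_of_le hip with heq' | hplt
              · have := hinc i (by omega) (by omega); omega
              · omega
            refine ⟨p, hpi, hp1, ?_, hinc⟩
            intro j h1 h2
            exact hdec j (by omega) h2
    · rw [if_neg h]
      constructor
      · intro hfalse; exact absurd hfalse (by simp)
      · rintro ⟨p, hip, hp1, -, -⟩
        exact absurd hp1 (by omega)

-- A = true on a list of length ≥ 2 iff some interior bottom exists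
theorem valley_iff (l : List Int) (h2 : 2 ≤ l.length) :
    valley l = true ↔ ∃ p, ValleyAt l p := by
  unfold valley ValleyAt
  have h0 : ¬ l.length = 0 := by omega
  have h1 : ¬ l.length = 1 := by omega
  simp only [if_neg h0, if_neg h1]
  by_cases hg : l.getD 0 0 < l.getD 1 0
  · simp only [if_pos hg]
    constructor
    · intro hf; exact absurd hf (by simp)
    · rintro ⟨p, hp1, hp2, hdec, hinc⟩
      have := hdec 0 hp1
      simp only [Nat.zero_add] at this
      omega
  · simp only [if_neg hg]
    rw [valleyLoop1_iff l l.length 0 (by omega)]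
    constructor
    · rintro ⟨p, _, hp1, hdec, hinc⟩
      have hp0 : 1 ≤ p := by
        rcases Nat.eq_zero_or_pos p with rfl | hpos
        · have := hinc 0 le_rfl (by omega)
          simp only [Nat.zero_add] at this
          omega
        · exact hpos
      exact ⟨p, hp0, hp1, fun j hj => hdec j (Nat.zero_le _) hj, hinc⟩
    · rintro ⟨p, hp0, hp1, hdec, hinc⟩
      exact ⟨p, Nat.zero_le _, hp1, fun j _ hj => hdec j hj, hinc⟩

-- the argmin loop returns the first index of the minimum
theorem argminLoop_spec (l : List Int) :
    ∀ (fuel b i : Nat), l.length - i ≤ fuel → b < l.length →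
    (∀ j, j < i → l.getD b 0 ≤ l.getD j 0) →
    (∀ j, j < b → l.getD b 0 < l.getD j 0) →
    argminLoop l fuel b i < l.length ∧
    (∀ j, j < l.length → l.getD (argminLoop l fuel b i) 0 ≤ l.getD j 0) ∧
    (∀ j, j < argminLoop l fuel b i → l.getD (argminLoop l fuel b i) 0 < l.getD j 0) := by
  intro fuel
  induction fuel with
  | zero =>
    intro b i hf hb hle hlt
    exact ⟨hb, fun j hj => hle j (by omega), hlt⟩
  | succ fuel ih =>
    intro b i hf hb hle hlt
    simp only [argminLoop]
    by_cases h : i < l.length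
    · rw [if_pos h]
      by_cases hless : l.getD i 0 < l.getD b 0
      · rw [if_pos hless]
        apply ih i (i + 1) (by omega) h
        · intro j hj
          rcases Nat.lt_succ_iff_lt_or_eq.mp hj with hj' | hj'
          · exact le_of_lt (lt_of_lt_of_le hless (hle j hj'))
          · subst hj'; exact le_rfl
        · intro j hj
          exact lt_of_lt_of_le hless (hle j hj)
      · rw [if_neg hless]
        apply ih b (i + 1) (by omega) hb
        · intro j hj
          rcases Nat.lt_succ_iff_lt_or_eq.mp hj with hj' | hj'
          · exact hle j hj'
          · subst hj'; omega
        · exact hlt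
    · rw [if_neg h]
      exact ⟨hb, fun j hj => hle j (by omega), hlt⟩

-- strictly decreasing up to p: l[p] is below every earlier element
theorem chain_dec (l : List Int) (p : Nat)
    (hdec : ∀ j, j < p → l.getD (j + 1) 0 < l.getD j 0) :
    ∀ i, i < p → l.getD p 0 < l.getD i 0 := by
  intro i hi
  have key : ∀ d i, i + d = p → 0 < d → l.getD p 0 < l.getD i 0 := by
    intro d
    induction d with
    | zero => intro i _ h; omega
    | succ d ih =>
      intro i heq _
      rcases Nat.eq_zero_or_pos d with rfl | hd
      · have hip : i + 1 = p := by omega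
        have h := hdec i (by omega)
        rw [hip] at h
        exact h
      · exact lt_trans (ih (i + 1) (by omega) hd) (hdec i (by omega))
  exact key (p - i) i (by omega) (by omega)

-- strictly increasing from p on: l[p] is below every later element
theorem chain_inc (l : List Int) (p : Nat)
    (hinc : ∀ j, p ≤ j → j + 1 < l.length → l.getD j 0 < l.getD (j + 1) 0) :
    ∀ i, p < i → i < l.length → l.getD p 0 < l.getD i 0 := by
  intro i hpi hin
  have key : ∀ d i, p + d = i → 0 < d → i < l.length → l.getD p 0 < l.getD i 0 := by
    intro d
    induction d with
    | zero => intro i _ h; omega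
    | succ d ih =>
      intro i heq _ hlen
      rcases Nat.eq_zero_or_pos d with rfl | hd
      · have hip : p + 1 = i := by omega
        have h := hinc p le_rfl (by omega)
        rw [hip] at h
        exact h
      · have h1 := ih (p + d) (by omega) hd (by omega)
        have h2 := hinc (p + d) (by omega) (by omega)
        have hi : p + d + 1 = i := by omega
        rw [hi] at h2
        exact lt_trans h1 h2
  exact key (i - p) i (by omega) (by omega) hin

-- B = true on a list of length ≥ 3 iff some interior bottom exists
theorem valley_alt_iff (l : List Int) (h3 : 3 ≤ l.length) :
    valley_alt l = true ↔ ∃ p, ValleyAt l p := by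
  unfold valley_alt ValleyAt
  have h0 : ¬ l.length = 0 := by omega
  have hn3 : ¬ l.length < 3 := by omega
  simp only [if_neg h0, if_neg hn3]
  obtain ⟨hblen, hmin, hfirst⟩ :=
    argminLoop_spec l l.length 0 1 (by omega) (by omega)
      (by intro j hj; obtain rfl : j = 0 := (by omega); exact le_rfl)
      (by intro j hj; omega)
  set b := argminLoop l l.length 0 1 with hbdef
  by_cases hbad : b = 0 ∨ b = l.length - 1
  · rw [if_pos hbad]
    constructor
    · intro hf; exact absurd hf (by simp)
    · rintro ⟨p, hp1, hp2, hdec, hinc⟩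
      -- p is the unique strict minimum, so b = p, contradicting b being on the border
      have huniq : ∀ j, j < l.length → j ≠ p → l.getD p 0 < l.getD j 0 := by
        intro j hj hne
        rcases Nat.lt_or_ge j p with hlt | hge
        · exact chain_dec l p hdec j hlt
        · exact chain_inc l p hinc j (by omega) hj
      have hbp : b = p := by
        by_contra hne
        have hmb := hmin p (by omega)
        have hub := huniq b hblen hne
        omega
      omega
  · rw [if_neg hbad]
    have hb0 : b ≠ 0 := fun h => hbad (Or.inl h)
    have hbn : b ≠ l.length - 1 := fun h => hbad (Or.inr h)
    rw [Bool.and_eq_true, List.all_eq_true, List.all_eq_true]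
    constructor
    · rintro ⟨hpre, hsuf⟩
      refine ⟨b, by omega, by omega, ?_, ?_⟩
      · intro j hj
        have := hpre j (List.mem_range.mpr hj)
        simpa using this
      · intro j hbj hj
        have hmem : j ∈ List.range' b (l.length - 1 - b) := by
          rw [List.mem_range'_1]
          omega
        have := hsuf j hmem
        simpa using this
    · rintro ⟨p, hp1, hp2, hdec, hinc⟩
      have huniq : ∀ j, j < l.length → j ≠ p → l.getD p 0 < l.getD j 0 := by
        intro j hj hne
        rcases Nat.lt_or_ge j p with hlt | hge
        · exact chain_dec l p hdec j hlt
        · exact chain_inc l p hinc j (by omega) hj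
      have hbp : b = p := by
        by_contra hne
        have hmb := hmin p (by omega)
        have hub := huniq b hblen hne
        omega
      constructor
      · intro j hj
        rw [List.mem_range] at hj
        rw [hbp] at hj
        simpa using hdec j hj
      · intro j hj
        rw [List.mem_range'_1, hbp] at hj
        simpa using hinc j hj.1 (by omega)

theorem valley_eq_alt (l : List Int) : valley l = valley_alt l := by
  rcases Nat.lt_or_ge l.length 3 with hsmall | hbig
  · have hcase : l.length = 0 ∨ l.length = 1 ∨ l.length = 2 := by omega
    rcases hcase with h | h | h
    · have hnil : l = [] := List.eq_nil_of_length_eq_zero h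
      rw [hnil]; rfl
    · simp [valley, valley_alt, h]
    · -- length 2: A is always false (the first loop finds no interior bottom), B by n < 3
      have hA : valley l = false := by
        cases hv : valley l
        · rfl
        · exfalso
          obtain ⟨p, hp1, hp2, -, -⟩ := (valley_iff l (by omega)).mp hv
          omega
      rw [hA]
      simp [valley_alt, h]
  · have h1 := valley_iff l (by omega)
    have h2 := valley_alt_iff l hbig
    cases hv : valley l <;> cases hv' : valley_alt l <;> simp_all

-- ===== VERDICT (by name: the statement is the Claim_ definition above) =====
theorem valley_spec : Claim_equal_valley := by
  intro l _
  unfold Spec_valley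
  exact valley_eq_alt l
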